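-- pv_equiv track=rewrite | github.com/peme969/peme969 | generate_contributions_graph.py | build_text_pixels
-- ===== SOURCE A (Python) =====
-- FONT_5x7 = {
--     "A": [
--         ".###.",
--         "#...#",
--         "#...#",
--         "#####",
--         "#...#",
--         "#...#",
--         ".....",
--     ],
--     "B": [
--         "####.",
--         "#...#",
--         "####.",
--         "#...#",
--         "#...#",
--         "####.",
--         ".....",
--     ],
--     "E": [
--         "#####",
--         "#....",
--         "###..",
--         "#....",
--         "#....",
--         "#####",
--         ".....",
--     ],
--     "M": [
--         "#...#",
--         "##.##",
--         "#.#.#",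
--         "#.#.#",
--         "#...#",
--         "#...#",
--         ".....",
--     ],
--     "P": [
--         "####.",
--         "#...#",
--         "####.",
--         "#....",
--         "#....",
--         "#....",
--         ".....",
--     ],
--     "F": [
--         "#####",
--         "#....",
--         "###..",
--         "#....",
--         "#....",
--         "#....",
--         ".....",
--     ],
--     " ": [
--         ".....",
--         ".....",
--         ".....",
--         ".....",
--         ".....",
--         ".....",
--         ".....",
--     ],
-- }
--
-- def build_text_pixels(text: str, scale: int = 2, spacing: int = 1):
--     """
--     Convert TEXT_WORD into a list of "on" pixel positions using the 5x7 font.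
--
--     Returns:
--       pixels: list[(col, row)]
--       num_cols: total columns in the scaled grid
--       num_rows: total rows in the scaled grid
--     """
--     text = text.upper()
--     # Build the base 5x7 grid row by row
--     base_rows = [""] * 7
--     first = True
--     for ch in text:
--         pattern = FONT_5x7.get(ch, FONT_5x7[" "])  # unknown → space
--         for r in range(7):
--             if not first:
--                 base_rows[r] += "." * spacing
--             base_rows[r] += pattern[r]
--         first = False
--     base_cols = len(base_rows[0])
--     base_rows_count = len(base_rows)
--     pixels = []
--     for row_idx, row in enumerate(base_rows):
--         for col_idx, ch in enumerate(row):
--             if ch == "#":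
--                 # scale each "on" pixel into a block of size scale x scale
--                 for sy in range(scale):
--                     for sx in range(scale):
--                         pixels.append((col_idx * scale + sx, row_idx * scale + sy))
--     num_cols = base_cols * scale
--     num_rows = base_rows_count * scale
--     return pixels, num_cols, num_rows
-- ===== SOURCE B (Python) =====
-- FONT_5x7 = {
--     "A": [".###.", "#...#", "#...#", "#####", "#...#", "#...#", "....."],
--     "B": ["####.", "#...#", "####.", "#...#", "#...#", "####.", "....."],
--     "E": ["#####", "#....", "###..", "#....", "#....", "#####", "....."],
--     "M": ["#...#", "##.##", "#.#.#", "#.#.#", "#...#", "#...#", "....."],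
--     "P": ["####.", "#...#", "####.", "#....", "#....", "#....", "....."],
--     "F": ["#####", "#....", "###..", "#....", "#....", "#....", "....."],
--     " ": [".....", ".....", ".....", ".....", ".....", ".....", "....."],
-- }
--
-- def build_text_pixels(text: str, scale: int = 2, spacing: int = 1):
--     """Same result as the original, but without building the concatenated
--     base_rows strings: each character keeps its own 5x7 pattern and a
--     closed-form column offset i*(5+spacing)."""
--     pats = [FONT_5x7.get(ch, FONT_5x7[" "]) for ch in text.upper()]
--     step = 5 + max(spacing, 0)  # negative spacing contributes no columns
--     pixels = []
--     for row_idx in range(7):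
--         y0 = row_idx * scale
--         for i, pattern in enumerate(pats):
--             off = i * step
--             row = pattern[row_idx]
--             for col in range(5):
--                 if row[col] == "#":
--                     x0 = (off + col) * scale
--                     for sy in range(scale):
--                         for sx in range(scale):
--                             pixels.append((x0 + sx, y0 + sy))
--     n = len(pats)
--     num_cols = ((n - 1) * step + 5) * scale if n else 0
--     num_rows = 7 * scale
--     return pixels, num_cols, num_rows
-- ===== Notes on version B (the rewrite author's own statement) =====
-- stated objective: alternative
-- what changed: B eliminates the intermediate concatenated base_rows strings entirely: it keeps each character's 5x7 pattern and computes its column offset in closed form (i*(5+spacing)), emitting pixels row-major straight from the patterns, and computes num_cols by formula instead of measuring the built row.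
import Mathlib
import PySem

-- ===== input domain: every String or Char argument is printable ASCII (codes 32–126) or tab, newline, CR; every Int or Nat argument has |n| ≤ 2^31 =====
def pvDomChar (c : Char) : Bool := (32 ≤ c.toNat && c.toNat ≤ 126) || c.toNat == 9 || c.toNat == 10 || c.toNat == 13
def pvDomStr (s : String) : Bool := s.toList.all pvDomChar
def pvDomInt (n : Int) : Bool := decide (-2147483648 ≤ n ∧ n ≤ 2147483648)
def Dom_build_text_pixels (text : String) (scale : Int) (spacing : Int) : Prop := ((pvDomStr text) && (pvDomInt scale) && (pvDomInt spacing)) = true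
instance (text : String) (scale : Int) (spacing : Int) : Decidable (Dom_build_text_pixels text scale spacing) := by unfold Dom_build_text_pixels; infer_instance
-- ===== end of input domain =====

-- B drops the intermediate concatenated base_rows strings and emits pixels straight from
-- each character's 5x7 pattern with a closed-form column offset (objective: alternative).

-- the module constant FONT_5x7 (dict lookup with space default → total function)
def pvPat (c : Char) : List (List Char) :=
  if c = 'A' then [".###.".toList, "#...#".toList, "#...#".toList, "#####".toList, "#...#".toList, "#...#".toList, ".....".toList]
  else if c = 'B' then ["####.".toList, "#...#".toList, "####.".toList, "#...#".toList, "#...#".toList, "####.".toList, ".....".toList]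
  else if c = 'E' then ["#####".toList, "#....".toList, "###..".toList, "#....".toList, "#....".toList, "#####".toList, ".....".toList]
  else if c = 'M' then ["#...#".toList, "##.##".toList, "#.#.#".toList, "#.#.#".toList, "#...#".toList, "#...#".toList, ".....".toList]
  else if c = 'P' then ["####.".toList, "#...#".toList, "####.".toList, "#....".toList, "#....".toList, "#....".toList, ".....".toList]
  else if c = 'F' then ["#####".toList, "#....".toList, "###..".toList, "#....".toList, "#....".toList, "#....".toList, ".....".toList]
  else [".....".toList, ".....".toList, ".....".toList, ".....".toList, ".....".toList, ".....".toList, ".....".toList]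

-- ===== PORT A =====
-- literal transliteration of A: build the 7 concatenated base rows by folding over the
-- characters (the 'for r in range(7)' in-place update is the pointwise zipWith with the
-- 7 patterns), then scan the rows with enumerate.  "."*spacing is pyRepeat (negative→[]).
def build_text_pixels (text : String) (scale : Int) (spacing : Int) : (List (Int × Int)) × Int × Int :=
  let t := (PySem.Str.upper text).toList
  let res := t.foldl (fun (st : List (List Char) × Bool) ch =>
      (st.1.zipWith (fun row p =>
          row ++ (if st.2 then [] else PySem.List.pyRepeat ['.'] spacing) ++ p) (pvPat ch), false))
    (List.replicate 7 ([] : List Char), true)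
  let baseRows := res.1
  let baseCols : Int := (baseRows.headD []).length        -- len(base_rows[0]); base_rows always has 7 entries
  let baseRowsCount : Int := baseRows.length
  let pixels := (PySem.List.enumerate baseRows 0).flatMap (fun rw =>
      (PySem.List.enumerate rw.2 0).flatMap (fun cc =>
        if cc.2 = '#' then
          (PySem.List.pyRange 0 scale 1).flatMap (fun sy =>
            (PySem.List.pyRange 0 scale 1).map (fun sx =>
              (cc.1 * scale + sx, rw.1 * scale + sy)))
        else []))
  (pixels, baseCols * scale, baseRowsCount * scale)

-- ===== PORT B =====
-- literal transliteration of Source B: per-character patterns with arithmetic offsets,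
-- row-major outer loop, closed-form num_cols.  pattern[row_idx] / row[col] are always
-- in range (row_idx<7, col<5); pyGetD is exact there.
def build_text_pixels_alt (text : String) (scale : Int) (spacing : Int) : (List (Int × Int)) × Int × Int :=
  let pats := (PySem.Str.upper text).toList.map pvPat
  let step : Int := 5 + max spacing 0
  let pixels := (PySem.List.pyRange 0 7 1).flatMap (fun rowIdx =>
      let y0 := rowIdx * scale
      (PySem.List.enumerate pats 0).flatMap (fun ip =>
        let off := ip.1 * step
        let row := PySem.List.pyGetD ip.2 rowIdx []
        (PySem.List.pyRange 0 5 1).flatMap (fun col =>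
          if PySem.List.pyGetD row col '.' = '#' then
            let x0 := (off + col) * scale
            (PySem.List.pyRange 0 scale 1).flatMap (fun sy =>
              (PySem.List.pyRange 0 scale 1).map (fun sx => (x0 + sx, y0 + sy)))
          else [])))
  let n : Int := pats.length
  (pixels, if n = 0 then 0 else ((n - 1) * step + 5) * scale, 7 * scale)

-- ===== PRECONDITION & SPEC =====
def Spec_build_text_pixels (text : String) (scale : Int) (spacing : Int) (out : (List (Int × Int)) × Int × Int) : Prop := out = build_text_pixels_alt text scale spacing
instance (text : String) (scale : Int) (spacing : Int) (out : (List (Int × Int)) × Int × Int) : Decidable (Spec_build_text_pixels text scale spacing out) := by unfold Spec_build_text_pixels; infer_instance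

-- ===== CLAIM (what is proved, stated in full; the proofs are below) =====
def Claim_equal_build_text_pixels : Prop := ∀ (text : String) (scale : Int) (spacing : Int), Dom_build_text_pixels text scale spacing → Spec_build_text_pixels text scale spacing (build_text_pixels text scale spacing)

-- ===== LEMMAS AND PROOFS =====

-- the scale×scale block for one "on" base pixel
def pvCell (scale x0 y0 : Int) : List (Int × Int) :=
  (PySem.List.pyRange 0 scale 1).flatMap (fun sy =>
    (PySem.List.pyRange 0 scale 1).map (fun sx => (x0 + sx, y0 + sy)))

-- scan one base row left to right, current column = off
def pvScan (scale y0 : Int) : Int → List Char → List (Int × Int)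
  | _, [] => []
  | off, c :: cs => (if c = '#' then pvCell scale (off * scale) y0 else []) ++ pvScan scale y0 (off + 1) cs

-- emit row r of a list of patterns, starts at `start`, advancing by `step` per character
def pvRowPix (scale y0 step : Int) (r : Nat) : Int → List Char → List (Int × Int)
  | _, [] => []
  | start, c :: cs =>
      pvScan scale y0 start ((pvPat c).getD r []) ++ pvRowPix scale y0 step r (start + step) cs

-- the contribution of one non-first character to base row r
def pvChunk (sp r : Nat) (c : Char) : List Char := List.replicate sp '.' ++ (pvPat c).getD r []

theorem pvPat_length (c : Char) : (pvPat c).length = 7 := by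
  unfold pvPat; split_ifs <;> rfl

theorem pvPat_row_length (c : Char) (r : Nat) (h : r < 7) : ((pvPat c).getD r []).length = 5 := by
  unfold pvPat; split_ifs <;> (interval_cases r <;> rfl)

theorem pvScan_eq_enumerate (scale y0 : Int) (row : List Char) : ∀ off : Int,
    (PySem.List.enumerate row off).flatMap
      (fun cc => if cc.2 = '#' then
          (PySem.List.pyRange 0 scale 1).flatMap (fun sy =>
            (PySem.List.pyRange 0 scale 1).map (fun sx => (cc.1 * scale + sx, y0 + sy)))
        else []) =
    pvScan scale y0 off row := by
  induction row with
  | nil => intro off; simp [PySem.List.enumerate_nil, pvScan]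
  | cons c cs ih => intro off; simp [PySem.List.enumerate_cons, pvScan, pvCell, ih]

theorem pvScan_append (scale y0 : Int) : ∀ (s t : List Char) (off : Int),
    pvScan scale y0 off (s ++ t) = pvScan scale y0 off s ++ pvScan scale y0 (off + s.length) t := by
  intro s
  induction s with
  | nil => intro t off; simp [pvScan]
  | cons c cs ih =>
      intro t off
      simp [pvScan, ih, List.append_assoc]
      ring_nf

theorem pvScan_dots (scale y0 : Int) : ∀ (n : Nat) (off : Int),
    pvScan scale y0 off (List.replicate n '.') = [] := by
  intro n
  induction n with
  | zero => intro off; simp [pvScan]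
  | succ m ih => intro off; simp [List.replicate_succ, pvScan, ih]

theorem pvScan_flatMap (scale y0 : Int) (sp r : Nat) (h : r < 7) : ∀ (us : List Char) (j : Int),
    pvScan scale y0 j (us.flatMap (pvChunk sp r)) =
    pvRowPix scale y0 (5 + (sp : Int)) r (j + sp) us := by
  intro us
  induction us with
  | nil => intro j; simp [pvRowPix, pvScan]
  | cons c cs ih =>
      intro j
      have hlen : ((pvPat c).getD r []).length = 5 := pvPat_row_length c r h
      rw [List.flatMap_cons, pvChunk, List.append_assoc, pvScan_append, pvScan_dots,
          List.nil_append, pvScan_append, hlen, List.length_replicate, ih, pvRowPix]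
      congr 2
      push_cast; ring

theorem pvFoldA (spacing : Int) : ∀ (us : List Char) (rows : List (List Char)), rows.length = 7 →
    (us.foldl (fun (st : List (List Char) × Bool) ch =>
        (st.1.zipWith (fun row p =>
            row ++ (if st.2 then [] else PySem.List.pyRepeat ['.'] spacing) ++ p) (pvPat ch), false))
      (rows, false)).1 =
    (List.range 7).map (fun r => rows.getD r [] ++ us.flatMap (pvChunk spacing.toNat r)) := by
  intro us
  induction us with
  | nil =>
      intro rows hl
      apply List.ext_getElem
      · simp [hl]
      · intro i h1 h2
        simp at h2
        simp [List.getD_eq_getElem?_getD, List.getElem?_eq_getElem (by omega : i < rows.length)]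
  | cons c cs ih =>
      intro rows hl
      rw [List.foldl_cons]
      have hl' : (rows.zipWith (fun row p =>
          row ++ (if false then [] else PySem.List.pyRepeat ['.'] spacing) ++ p) (pvPat c)).length = 7 := by
        simp [hl, pvPat_length]
      rw [ih _ hl']
      apply List.map_congr_left
      intro r hr
      have hr7 : r < 7 := List.mem_range.mp hr
      have h1 : r < (rows.zipWith (fun row p =>
          row ++ (if false then [] else PySem.List.pyRepeat ['.'] spacing) ++ p) (pvPat c)).length := by
        omega
      have h2 : r < rows.length := by omega
      have h3 : r < (pvPat c).length := by rw [pvPat_length]; omega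
      rw [List.getD_eq_getElem _ _ h1, List.getElem_zipWith, List.flatMap_cons, pvChunk,
          List.getD_eq_getElem _ _ h2, List.getD_eq_getElem _ _ h3]
      simp [PySem.List.pyRepeat_singleton, List.append_assoc]

theorem pvB_inner (scale y0 off : Int) (row : List Char) (h : row.length = 5) :
    (PySem.List.pyRange 0 5 1).flatMap (fun col =>
      if PySem.List.pyGetD row col '.' = '#' then
        (PySem.List.pyRange 0 scale 1).flatMap (fun sy =>
          (PySem.List.pyRange 0 scale 1).map (fun sx => ((off + col) * scale + sx, y0 + sy)))
      else []) = pvScan scale y0 off row := by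
  match row, h with
  | [a, b, c, d, e], _ =>
    have h5 : PySem.List.pyRange 0 5 1 = [0, 1, 2, 3, 4] := by decide
    rw [h5]
    simp only [List.flatMap_cons, List.flatMap_nil, List.append_nil, pvScan, pvCell]
    norm_num [PySem.List.pyGetD, PySem.List.pyIdx?, PySem.List.pyGet?]
    ring_nf
    simp
    rfl

theorem pvB_enum (scale y0 step : Int) (r : Nat) (hr : r < 7) : ∀ (us : List Char) (i : Int),
    (PySem.List.enumerate (us.map pvPat) i).flatMap (fun ip =>
      (PySem.List.pyRange 0 5 1).flatMap (fun col =>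
        if PySem.List.pyGetD (PySem.List.pyGetD ip.2 (r : Int) []) col '.' = '#' then
          (PySem.List.pyRange 0 scale 1).flatMap (fun sy =>
            (PySem.List.pyRange 0 scale 1).map (fun sx =>
              ((ip.1 * step + col) * scale + sx, y0 + sy)))
        else [])) = pvRowPix scale y0 step r (i * step) us := by
  intro us
  induction us with
  | nil => intro i; simp [PySem.List.enumerate_nil, pvRowPix]
  | cons c cs ih =>
      intro i
      rw [List.map_cons, PySem.List.enumerate_cons, List.flatMap_cons, ih]
      have hget : PySem.List.pyGetD (pvPat c) (r : Int) [] = (pvPat c).getD r [] := by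
        rw [PySem.List.pyGetD_eq_getElem _ _ (by positivity)
              (by rw [pvPat_length]; exact_mod_cast hr),
            List.getD_eq_getElem _ _ (by rw [pvPat_length]; omega)]
        simp
      rw [pvRowPix]
      congr 1
      · rw [hget, pvB_inner scale y0 (i * step) _ (pvPat_row_length c r hr)]
      · congr 1; ring

-- length of the non-first part of a base row
theorem pvChunk_flatMap_length (sp r : Nat) (h : r < 7) : ∀ us : List Char,
    (us.flatMap (pvChunk sp r)).length = us.length * (sp + 5) := by
  intro us
  induction us with
  | nil => simp
  | cons c cs ih =>
      have hlen : ((pvPat c).getD r []).length = 5 := pvPat_row_length c r h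
      simp only [List.flatMap_cons, pvChunk, List.length_append, List.length_replicate, hlen,
        List.length_cons, ih]
      ring

-- the two pixel lists agree row by row
theorem pv_main (text : String) (scale spacing : Int) :
    build_text_pixels text scale spacing = build_text_pixels_alt text scale spacing := by
  unfold build_text_pixels build_text_pixels_alt
  generalize (PySem.Str.upper text).toList = us
  have hsp : ((spacing.toNat : Int)) = max spacing 0 := Int.toNat_eq_max spacing
  cases us with
  | nil =>
      simp [PySem.List.enumerate_nil, List.replicate, PySem.List.enumerate_cons]
  | cons u rest =>
      dsimp only
      rw [List.foldl_cons]
      dsimp only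
      have hS0len : (List.zipWith (fun row p =>
          row ++ (if (true : Bool) then [] else PySem.List.pyRepeat ['.'] spacing) ++ p)
          (List.replicate 7 ([] : List Char)) (pvPat u)).length = 7 := by
        simp [pvPat_length]
      rw [pvFoldA spacing rest _ hS0len]
      have hS0 : (List.zipWith (fun row p =>
          row ++ (if (true : Bool) then [] else PySem.List.pyRepeat ['.'] spacing) ++ p)
          (List.replicate 7 ([] : List Char)) (pvPat u)) = pvPat u := by
        apply List.ext_getElem
        · rw [hS0len, pvPat_length]
        · intro i h1 h2
          rw [pvPat_length] at h2
          rw [List.getElem_zipWith]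
          simp
          interval_cases i <;> rfl
      rw [hS0]
      simp only [Prod.mk.injEq]
      refine ⟨?_, ?_, ?_⟩
      · -- pixels agree row by row
        rw [PySem.List.enumerate_eq_map_pyRange _ ([] : List Char), List.flatMap_map]
        have hlen7 : PySem.List.len ((List.range 7).map (fun r =>
            (pvPat u).getD r [] ++ rest.flatMap (pvChunk spacing.toNat r))) = 7 := by
          simp [PySem.List.len]
        rw [hlen7]
        refine List.flatMap_congr ?_
        intro j hj
        rw [PySem.List.mem_pyRange_one] at hj
        obtain ⟨h0, h7⟩ := hj
        have hj' : j = ((j.toNat : Nat) : Int) := by omega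
        have hr7 : j.toNat < 7 := by omega
        dsimp only
        have hrow : PySem.List.pyGetD
            (List.map (fun r => (pvPat u).getD r [] ++ List.flatMap (pvChunk spacing.toNat r) rest)
              (List.range 7)) j [] =
            (pvPat u).getD j.toNat [] ++ List.flatMap (pvChunk spacing.toNat j.toNat) rest := by
          rw [PySem.List.pyGetD_eq_getElem _ _ h0 (by simpa using h7)]
          rw [List.getElem_map, List.getElem_range]
        rw [hrow, hj']
        simp only [Int.toNat_natCast]
        rw [pvB_enum scale ((j.toNat : Int) * scale) (5 + max spacing 0) j.toNat hr7 (u :: rest) 0]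
        rw [pvScan_eq_enumerate scale ((j.toNat : Int) * scale) _ 0]
        rw [pvScan_append, pvPat_row_length u j.toNat hr7,
            pvScan_flatMap scale ((j.toNat : Int) * scale) spacing.toNat j.toNat hr7 rest]
        rw [pvRowPix, ← hsp]
        norm_num
      · -- num_cols
        have hrange7 : List.range 7 = [0, 1, 2, 3, 4, 5, 6] := by decide
        rw [hrange7]
        simp only [List.map_cons, List.headD_cons]
        simp only [List.length_append, pvPat_row_length u 0 (by omega),
          pvChunk_flatMap_length spacing.toNat 0 (by omega) rest, List.length_map,
          List.length_cons]
        rw [if_neg (by push_cast; omega)]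
        push_cast [← hsp]
        ring
      · -- num_rows
        simp

-- ===== VERDICT (by name: the statement is the Claim_ definition above) =====
theorem build_text_pixels_spec : Claim_equal_build_text_pixels := by
  intro text scale spacing _
  unfold Spec_build_text_pixels
  exact pv_main text scale spacing
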